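-- pv_equiv track=rewrite | github.com/gardatech/bugbane | bugbane/modules/fuzzer_cmd/aflplusplus.py | _specs_to_dict
-- ===== SOURCE A (Python) =====
-- from typing import Optional, List, Dict
--
-- def _specs_to_dict(
--     specs: List[str], spec_separator: str
-- ) -> Dict[str, List[str]]:
--     """
--     Convert list of strings like '/fuzz/basic/fuzzer;sync_dir' to
--     dictionary, where '/fuzz/basic/fuzzer' becomes key and 'sync_dir' - value
--     """
--     result: Dict[str, List[str]] = {}
--     for spec in specs:
--         samples_subdir, app_path = spec.split(spec_separator, 1)
--         if app_path in result:
--             result[app_path].append(samples_subdir)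
--         else:
--             result[app_path] = [samples_subdir]
--     return result
-- ===== SOURCE B (Python) =====
-- def _specs_to_dict(specs, spec_separator):
--     """
--     Convert list of strings like '/fuzz/basic/fuzzer;sync_dir' to
--     dictionary, where '/fuzz/basic/fuzzer' becomes key and 'sync_dir' - value
--     """
--     pairs = [(s, a) for s, a in (spec.split(spec_separator, 1) for spec in specs)]
--     keys = list(dict.fromkeys(a for _, a in pairs))
--     return {k: [s for s, a in pairs if a == k] for k in keys}
-- ===== Notes on version B (the rewrite author's own statement) =====
-- stated objective: alternative
-- what changed: Instead of building the dict incrementally with a per-spec membership test and append/insert branch, B splits all specs up front into (value, key) pairs, dedupes the keys in first-occurrence order via dict.fromkeys, and builds each key's value list by a filtering comprehension over the pair list.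
import Mathlib
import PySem

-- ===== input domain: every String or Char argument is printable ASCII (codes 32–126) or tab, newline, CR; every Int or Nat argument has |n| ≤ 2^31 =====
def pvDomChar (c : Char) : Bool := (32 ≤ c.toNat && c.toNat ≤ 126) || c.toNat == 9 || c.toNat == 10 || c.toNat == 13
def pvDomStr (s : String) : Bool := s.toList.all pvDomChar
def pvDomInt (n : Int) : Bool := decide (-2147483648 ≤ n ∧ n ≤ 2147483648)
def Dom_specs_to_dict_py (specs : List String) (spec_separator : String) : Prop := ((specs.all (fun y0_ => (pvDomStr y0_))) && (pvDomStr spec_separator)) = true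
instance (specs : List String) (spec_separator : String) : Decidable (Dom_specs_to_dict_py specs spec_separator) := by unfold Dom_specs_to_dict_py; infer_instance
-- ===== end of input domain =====

-- B splits all specs into (value, key) pairs first, dedupes keys in first-occurrence
-- order, and builds each key's value list by filtering the pair list (alternative
-- decomposition; same results as A's incremental dict build).


-- shared helper: spec.split(sep, 1) unpacked into exactly two parts (none = ValueError)
def pvSplit2? (spec sep : String) : Option (String × String) :=
  match PySem.Str.splitMax? spec sep 1 with
  | some [x, y] => some (x, y)
  | _ => none

-- ===== PORT A =====
def specs_to_dict_py (specs : List String) (spec_separator : String) : List (String × List String) :=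
  (specs.foldl (fun result spec =>
      match pvSplit2? spec spec_separator with
      | some (samples_subdir, app_path) =>
          if result.contains app_path then
            result.modify app_path [] (fun v => v ++ [samples_subdir])
          else
            result.insert app_path [samples_subdir]
      | none => result)
    PySem.Dict.empty).items

-- ===== PORT B =====
def specs_to_dict_py_alt (specs : List String) (spec_separator : String) : List (String × List String) :=
  let pairs := specs.filterMap (fun spec => pvSplit2? spec spec_separator)
  let keys := PySem.List.dedup (pairs.map (fun p => p.2))
  keys.map (fun k => (k, (pairs.filter (fun p => p.2 == k)).map (fun p => p.1)))

-- ===== PRECONDITION & SPEC =====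
-- Pre_ excludes exactly the inputs where Python A raises ValueError: some spec is
-- split with an empty separator, or does not contain the separator (unpacking fails).
def Pre_specs_to_dict_py (specs : List String) (spec_separator : String) : Prop :=
  ∀ spec ∈ specs, spec_separator ≠ "" ∧ PySem.Str.isIn spec_separator spec = true
instance (specs : List String) (spec_separator : String) : Decidable (Pre_specs_to_dict_py specs spec_separator) := by unfold Pre_specs_to_dict_py; infer_instance
def pvWitness_specs_to_dict_py : List String × String := (["dir1;/bin/app", "dir2;/bin/app", "d;/bin/other"], ";")

def Spec_specs_to_dict_py (specs : List String) (spec_separator : String) (out : List (String × List String)) : Prop := out = specs_to_dict_py_alt specs spec_separator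
instance (specs : List String) (spec_separator : String) (out : List (String × List String)) : Decidable (Spec_specs_to_dict_py specs spec_separator out) := by unfold Spec_specs_to_dict_py; infer_instance

-- ===== CLAIM (what is proved, stated in full; the proofs are below) =====
def Claim_equal_specs_to_dict_py : Prop := ∀ (specs : List String) (spec_separator : String), Dom_specs_to_dict_py specs spec_separator → Pre_specs_to_dict_py specs spec_separator → Spec_specs_to_dict_py specs spec_separator (specs_to_dict_py specs spec_separator)

-- ===== LEMMAS AND PROOFS =====

-- the dict-update step of A, as a function of a (value, key) pair
def pvStep (d : PySem.Dict String (List String)) (p : String × String) : PySem.Dict String (List String) :=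
  d.modify p.2 [] (fun v => v ++ [p.1])

lemma pvStep_eq (d : PySem.Dict String (List String)) (s a : String) :
    (if d.contains a then d.modify a [] (fun v => v ++ [s]) else d.insert a [s]) = pvStep d (s, a) := by
  by_cases h : d.contains a = true
  · simp [h, pvStep]
  · simp [h, pvStep, PySem.Dict.modify, PySem.Dict.getD,
      (PySem.Dict.get?_eq_none_iff_contains d a).mpr (by simp [h])]

lemma foldA_eq (sep : String) : ∀ (specs : List String) (d : PySem.Dict String (List String)),
    specs.foldl (fun result spec =>
      match pvSplit2? spec sep with
      | some (samples_subdir, app_path) =>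
          if result.contains app_path then
            result.modify app_path [] (fun v => v ++ [samples_subdir])
          else
            result.insert app_path [samples_subdir]
      | none => result) d
    = (specs.filterMap (fun spec => pvSplit2? spec sep)).foldl pvStep d := by
  intro specs
  induction specs with
  | nil => intro d; rfl
  | cons spec rest ih =>
    intro d
    cases h : pvSplit2? spec sep with
    | none => simp [h, ih]
    | some p =>
      obtain ⟨s, a⟩ := p
      simp only [List.foldl_cons, List.filterMap_cons, h]
      rw [pvStep_eq, ih]

lemma items_char (d : PySem.Dict String (List String)) (h : d.keys.Nodup) :
    d.items = d.keys.map (fun k => (k, d.getD k [])) := by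
  obtain ⟨l⟩ := d
  induction l with
  | nil => rfl
  | cons p rest ih =>
    obtain ⟨k0, v0⟩ := p
    simp only [PySem.Dict.keys, List.map_cons, List.nodup_cons, List.mem_map] at h
    obtain ⟨hk0, hrest⟩ := h
    simp only [PySem.Dict.keys, List.map_cons, List.map_map]
    have hself : (PySem.Dict.mk ((k0, v0) :: rest)).getD k0 [] = v0 := by
      simp [PySem.Dict.getD, PySem.Dict.get?]
    rw [List.cons.injEq]
    constructor
    · simp [hself]
    · have ihr := ih (by simpa [PySem.Dict.keys] using hrest)
      simp only [PySem.Dict.keys, List.map_map] at ihr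
      have hsame : List.map ((fun k => (k, (PySem.Dict.mk ((k0, v0) :: rest)).getD k [])) ∘ fun x => x.1) rest
          = List.map ((fun k => (k, (PySem.Dict.mk rest).getD k [])) ∘ fun x => x.1) rest := by
        apply List.map_congr_left
        intro q hq
        have hne : q.1 ≠ k0 := by
          intro he; exact hk0 ⟨q, hq, he⟩
        simp [Function.comp, PySem.Dict.getD, PySem.Dict.get?,
          show (k0 == q.1) = false by simpa using fun he => hne he.symm]
      rw [hsame, ← ihr]

lemma grouped_eq (ps : List (String × String)) :
    (ps.foldl pvStep PySem.Dict.empty).items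
    = (PySem.List.dedup (ps.map (fun p => p.2))).map
        (fun k => (k, (ps.filter (fun p => p.2 == k)).map (fun p => p.1))) := by
  have hswap : ps.foldl pvStep PySem.Dict.empty
      = (ps.map Prod.swap).foldl (fun d p => d.modify p.1 [] (fun v => v ++ [p.2])) PySem.Dict.empty := by
    rw [List.foldl_map]; rfl
  have hkeys : (ps.foldl pvStep PySem.Dict.empty).keys = PySem.List.dedup (ps.map (fun p => p.2)) := by
    have := PySem.Dict.keys_foldl_modify_key (κ := String) (ν := List String)
      ps (fun p => p.2) [] (fun _ p v => v ++ [p.1]) PySem.Dict.empty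
    simpa [pvStep, PySem.Dict.empty, PySem.Dict.keys, PySem.Set.update,
      PySem.List.dedup, PySem.Set.ofList, PySem.Set.empty] using this
  have hnodup : (ps.foldl pvStep PySem.Dict.empty).keys.Nodup := by
    exact PySem.Dict.nodup_keys_foldl_modify_key ps (fun p => p.2) [] (fun _ p v => v ++ [p.1])
      PySem.Dict.empty (by simp [PySem.Dict.empty, PySem.Dict.keys])
  have hgetD : ∀ k, (ps.foldl pvStep PySem.Dict.empty).getD k []
      = (ps.filter (fun p => p.2 == k)).map (fun p => p.1) := by
    intro k
    rw [hswap]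
    rw [PySem.Dict.getD_foldl_modify_append (ps.map Prod.swap) PySem.Dict.empty k]
    simp [PySem.Dict.empty, PySem.Dict.getD, PySem.Dict.get?, List.filter_map, Function.comp_def]
  rw [items_char _ hnodup, hkeys]
  apply List.map_congr_left
  intro k _
  rw [hgetD]

-- ===== VERDICT (by name: the statement is the Claim_ definition above) =====
theorem specs_to_dict_py_spec : Claim_equal_specs_to_dict_py := by
  intro specs sep _ _
  unfold Spec_specs_to_dict_py specs_to_dict_py specs_to_dict_py_alt
  rw [foldA_eq, grouped_eq]
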